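-- pv_equiv track=rewrite | github.com/pypi-data/pypi-mirror-309 | packages/VoPho/VoPho-0.0.12-py3-none-any.whl/VoPho/phonemizers/japanese.py | replace_tashdid
-- ===== SOURCE A (Python) =====
-- def replace_tashdid(input_string):
--     result = []
--     i = 0
--     while i < len(input_string):
--         if i + 1 < len(input_string) and input_string[i] == input_string[i + 1] and input_string[i] not in 'aiueo':
--             result.append('ʔ')
--             result.append(input_string[i])
--             i += 2  # Skip the next character as it is already processed
--         else:
--             result.append(input_string[i])
--             i += 1
--     return ''.join(result)
-- ===== SOURCE B (Python) =====
-- import re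
--
-- def replace_tashdid(input_string):
--     return re.sub(r'([^aiueo])\1', 'ʔ\\1', input_string)
-- ===== Notes on version B (the rewrite author's own statement) =====
-- stated objective: idiomatic
-- what changed: Replaced the explicit index-stepping while loop with a single non-overlapping regex substitution re.sub(r'([^aiueo])\1', 'ʔ\1', s).
import Mathlib
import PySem

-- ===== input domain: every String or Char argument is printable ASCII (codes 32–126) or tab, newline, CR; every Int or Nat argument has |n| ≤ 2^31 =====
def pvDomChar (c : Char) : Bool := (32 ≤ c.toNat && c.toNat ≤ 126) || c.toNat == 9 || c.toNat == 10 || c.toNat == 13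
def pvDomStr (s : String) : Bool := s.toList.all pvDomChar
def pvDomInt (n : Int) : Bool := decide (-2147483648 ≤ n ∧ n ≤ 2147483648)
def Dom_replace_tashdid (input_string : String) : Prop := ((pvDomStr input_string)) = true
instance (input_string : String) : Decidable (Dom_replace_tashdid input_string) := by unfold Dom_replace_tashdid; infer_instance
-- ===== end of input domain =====

-- B replaces A's index-stepping while loop with one non-overlapping regex substitution (idiomatic; same behaviour, same cost).


-- ===== PORT A =====
-- A's while loop: index i, list accumulator `result`, stepping by 2 on a doubled non-vowel.
def replaceTashdidLoopA (cs : List Char) (i : Nat) (result : List Char) : List Char :=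
  if _h : i < cs.length then
    if i + 1 < cs.length ∧ cs.getD i ' ' = cs.getD (i+1) ' ' ∧ cs.getD i ' ' ∉ ['a','i','u','e','o'] then
      replaceTashdidLoopA cs (i + 2) (result ++ ['ʔ', cs.getD i ' '])
    else
      replaceTashdidLoopA cs (i + 1) (result ++ [cs.getD i ' '])
  else result
termination_by cs.length - i

def replace_tashdid (input_string : String) : String :=
  String.ofList (replaceTashdidLoopA input_string.toList 0 [])

-- ===== PORT B =====
-- Hand port of re.sub(r'([^aiueo])\1', 'ʔ\1', s): the non-overlapping left-to-right scan of
-- this two-character pattern is exact — at each position try to match a doubled non-vowel pair,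
-- on success emit the replacement and continue after the pair, otherwise copy one char.
def reSubTashdid : List Char → List Char
  | c1 :: c2 :: rest =>
      if c1 = c2 ∧ c1 ∉ ['a','i','u','e','o'] then 'ʔ' :: c1 :: reSubTashdid rest
      else c1 :: reSubTashdid (c2 :: rest)
  | l => l

def replace_tashdid_alt (input_string : String) : String :=
  String.ofList (reSubTashdid input_string.toList)

-- ===== PRECONDITION & SPEC =====
def Spec_replace_tashdid (input_string : String) (out : String) : Prop := out = replace_tashdid_alt input_string
instance (input_string : String) (out : String) : Decidable (Spec_replace_tashdid input_string out) := by unfold Spec_replace_tashdid; infer_instance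

-- ===== CLAIM (what is proved, stated in full; the proofs are below) =====
def Claim_equal_replace_tashdid : Prop := ∀ (input_string : String), Dom_replace_tashdid input_string → Spec_replace_tashdid input_string (replace_tashdid input_string)

-- ===== LEMMAS AND PROOFS =====
theorem replaceTashdidLoopA_eq (cs : List Char) (i : Nat) (result : List Char) :
    replaceTashdidLoopA cs i result = result ++ reSubTashdid (cs.drop i) := by
  induction i, result using replaceTashdidLoopA.induct cs with
  | case1 i result h hc ih =>
      obtain ⟨h1, heq, hnv⟩ := hc
      have d0 : cs.drop i = cs.getD i ' ' :: cs.drop (i+1) := by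
        rw [List.drop_eq_getElem_cons h, List.getD_eq_getElem _ _ h]
      have d1 : cs.drop (i+1) = cs.getD (i+1) ' ' :: cs.drop (i+1+1) := by
        rw [List.drop_eq_getElem_cons h1, List.getD_eq_getElem _ _ h1]
      rw [replaceTashdidLoopA]
      simp only [dif_pos h]
      rw [if_pos (show i + 1 < cs.length ∧ cs.getD i ' ' = cs.getD (i+1) ' ' ∧
            cs.getD i ' ' ∉ ['a','i','u','e','o'] from ⟨h1, heq, hnv⟩)]
      rw [ih, d0, d1, reSubTashdid]
      rw [if_pos (show cs.getD i ' ' = cs.getD (i+1) ' ' ∧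
            cs.getD i ' ' ∉ ['a','i','u','e','o'] from ⟨heq, hnv⟩)]
      simp
  | case2 i result h hc ih =>
      have d0 : cs.drop i = cs.getD i ' ' :: cs.drop (i+1) := by
        rw [List.drop_eq_getElem_cons h, List.getD_eq_getElem _ _ h]
      rw [replaceTashdidLoopA]
      simp only [dif_pos h]
      rw [if_neg hc, ih, d0]
      by_cases h1 : i + 1 < cs.length
      · have d1 : cs.drop (i+1) = cs.getD (i+1) ' ' :: cs.drop (i+1+1) := by
          rw [List.drop_eq_getElem_cons h1, List.getD_eq_getElem _ _ h1]
        rw [d1, reSubTashdid]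
        rw [if_neg (fun ⟨hq, hv⟩ => hc ⟨h1, hq, hv⟩)]
        rw [← d1]
        simp
      · have hd : cs.drop (i+1) = [] := List.drop_eq_nil_of_le (by omega)
        simp [hd, reSubTashdid]
  | case3 i result h =>
      rw [replaceTashdidLoopA]
      have hd : cs.drop i = [] := List.drop_eq_nil_of_le (by omega)
      simp [dif_neg h, hd, reSubTashdid]

-- ===== VERDICT (by name: the statement is the Claim_ definition above) =====
theorem replace_tashdid_spec : Claim_equal_replace_tashdid := by
  intro s _
  unfold Spec_replace_tashdid replace_tashdid replace_tashdid_alt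
  rw [replaceTashdidLoopA_eq]
  simp
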